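-- pv_equiv track=rewrite | github.com/yz4004/codeforce-python | daily/problem_list/2025/0625.py | check
-- ===== SOURCE A (Python) =====
-- from collections import deque
-- from typing import List
--
-- def check(queries) -> List[int]:
--     res = []
--     q = deque([])
--     rev = False
--     s0 = 0
--     s1 = s2 = 0
--
--     for query in map(tuple, queries):
--         n = len(q)
--         if query[0] == 1:
--             # 向右轮转
--
--             last = q[-1] if not rev else q[0]
--
--             s1 = s1 - n * last + s0
--             s2 = s2 - s0 + n * last
--
--             if rev:
--                 q.append(q.popleft())
--             else:
--                 q.appendleft(q.pop())
--             res.append(s1)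
--
--         elif query[0] == 2:
--             # 反转
--
--             s1, s2 = s2, s1
--             rev = not rev
--             res.append(s1)
--
--         if query[0] == 3:
--             # 队尾新增
--             new = query[1]
--
--             s1 = s1 + (n+1) * new
--             s2 = s2 + s0 + new
--             s0 += new
--
--             if rev:
--                 q.appendleft(new)
--             else:
--                 q.append(new)
--             res.append(s1)
--     return res
-- ===== SOURCE B (Python) =====
-- def check(queries):
--     a = []
--     out = []
--     for query in queries:
--         t = query[0]
--         if t == 1:
--             a.insert(0, a.pop())
--         elif t == 2:
--             a.reverse()
--         elif t == 3:
--             a.append(query[1])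
--         else:
--             continue
--         out.append(sum((i + 1) * v for i, v in enumerate(a)))
--     return out
-- ===== Notes on version B (the rewrite author's own statement) =====
-- stated objective: simpler
-- what changed: B drops A's O(1) incremental bookkeeping (running sums s0/s1/s2 plus a reversal flag over a deque) and instead maintains the actual logical sequence as a plain list, performing each rotate/reverse/append literally and recomputing the 1-indexed weighted sum from scratch after every query.
import Mathlib
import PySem

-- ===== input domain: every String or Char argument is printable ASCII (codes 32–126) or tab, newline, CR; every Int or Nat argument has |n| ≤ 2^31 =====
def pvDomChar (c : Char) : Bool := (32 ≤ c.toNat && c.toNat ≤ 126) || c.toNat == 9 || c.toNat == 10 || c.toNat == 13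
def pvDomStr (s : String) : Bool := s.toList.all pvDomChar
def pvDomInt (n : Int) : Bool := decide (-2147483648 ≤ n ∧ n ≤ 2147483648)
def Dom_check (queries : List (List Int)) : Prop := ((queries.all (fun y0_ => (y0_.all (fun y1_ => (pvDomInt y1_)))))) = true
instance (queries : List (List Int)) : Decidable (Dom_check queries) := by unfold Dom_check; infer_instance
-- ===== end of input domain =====

-- B replaces A's O(1)-per-query incremental bookkeeping (s0/s1/s2 + rev flag over a deque)
-- by maintaining the actual sequence and recomputing the weighted sum after each query:
-- simpler and plainly correct, not faster.

-- ===== PORT A =====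
-- state: (res, q, rev, s0, s1, s2); the deque is a List Int (pop/appendleft etc. ported by hand,
-- exact on lists: q[-1]/q[0] via PySem.List.pyGet?, none = Python's IndexError).
def checkStepA (st : Option (List Int × List Int × Bool × Int × Int × Int)) (query : List Int) :
    Option (List Int × List Int × Bool × Int × Int × Int) :=
  match st with
  | none => none
  | some (res, q, rev, s0, s1, s2) =>
    match PySem.List.pyGet? query 0 with
    | none => none                                   -- query[0] IndexError
    | some t =>
      let n : Int := q.length
      if t = 1 then
        match (if rev then PySem.List.pyGet? q 0 else PySem.List.pyGet? q (-1)) with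
        | none => none                               -- q[-1] / q[0] IndexError on empty deque
        | some last =>
          let s1' := s1 - n * last + s0
          let s2' := s2 - s0 + n * last
          -- rev: q.append(q.popleft())  /  not rev: q.appendleft(q.pop())
          let q' := if rev then q.tail ++ [last] else last :: q.dropLast
          some (res ++ [s1'], q', rev, s0, s1', s2')
      else if t = 2 then
        some (res ++ [s2], q, !rev, s0, s2, s1)      -- s1, s2 = s2, s1; rev = not rev
      else if t = 3 then
        match PySem.List.pyGet? query 1 with
        | none => none                               -- query[1] IndexError
        | some new =>
          let s1' := s1 + (n + 1) * new
          let s2' := s2 + s0 + new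
          some (res ++ [s1'], if rev then new :: q else q ++ [new], rev, s0 + new, s1', s2')
      else
        some (res, q, rev, s0, s1, s2)

def check (queries : List (List Int)) : List Int :=
  match queries.foldl checkStepA (some ([], [], false, 0, 0, 0)) with
  | none => []                                       -- unreachable under Pre_check (Python raises)
  | some (res, _, _, _, _, _) => res

-- ===== PORT B =====
-- state: (a, out); a is the logical sequence, out the answers so far.
def checkStepB (st : Option (List Int × List Int)) (query : List Int) :
    Option (List Int × List Int) :=
  match st with
  | none => none
  | some (a, out) =>
    match PySem.List.pyGet? query 0 with
    | none => none                                   -- query[0] IndexError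
    | some t =>
      let a? : Option (List Int) :=
        if t = 1 then
          match PySem.List.pop? a with               -- a.pop(); none = IndexError on empty
          | none => none
          | some (x, rest) => some (PySem.List.insert rest 0 x)   -- a.insert(0, x)
        else if t = 2 then some a.reverse            -- a.reverse()
        else if t = 3 then
          match PySem.List.pyGet? query 1 with       -- query[1]
          | none => none
          | some v => some (a ++ [v])                -- a.append(query[1])
        else none
      match a? with
      | some a' =>
        -- out.append(sum((i + 1) * v for i, v in enumerate(a)))
        some (a', out ++ [(PySem.List.enumerate a').foldl (fun s p => s + (p.1 + 1) * p.2) 0])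
      | none =>
        if t = 1 ∨ t = 2 ∨ t = 3 then none           -- the operation itself raised
        else some (a, out)                           -- else: continue
def check_alt (queries : List (List Int)) : List Int :=
  match queries.foldl checkStepB (some ([], [])) with
  | none => []                                       -- unreachable under Pre_check (Python raises)
  | some (_, out) => out

-- ===== PRECONDITION & SPEC =====
-- Pre_check excludes exactly the inputs where the Python A raises IndexError (and so does B):
-- an empty query list (query[0]), a type-3 query without a second element (query[1]),
-- and a type-1 query before any type-3 query (rotating an empty deque).
def Pre_check (queries : List (List Int)) : Prop :=
  ∀ i, (h : i < queries.length) →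
    queries[i] ≠ [] ∧
    (queries[i].head? = some 3 → 2 ≤ queries[i].length) ∧
    (queries[i].head? = some 1 →
      (queries.take i).countP (fun q => q.head? == some 3) ≠ 0)
instance (queries : List (List Int)) : Decidable (Pre_check queries) := by
  unfold Pre_check; infer_instance

def pvWitness_check : List (List Int) := [[3, 5], [2], [1], [3, -2], [1], [4], [2]]

def Spec_check (queries : List (List Int)) (out : List Int) : Prop := out = check_alt queries
instance (queries : List (List Int)) (out : List Int) : Decidable (Spec_check queries out) := by
  unfold Spec_check; infer_instance

-- ===== CLAIM (what is proved, stated in full; the proofs are below) =====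
def Claim_equal_check : Prop :=
  ∀ (queries : List (List Int)), Dom_check queries → Pre_check queries →
    Spec_check queries (check queries)

-- ===== LEMMAS AND PROOFS =====

-- ws k l = Σ (k + i) * l[i]  (so ws 1 l is the 1-indexed weighted sum)
def ws (k : Int) : List Int → Int
  | [] => 0
  | x :: t => k * x + ws (k + 1) t

lemma ws_succ (k : Int) (l : List Int) : ws (k + 1) l = ws k l + l.sum := by
  induction l generalizing k with
  | nil => simp [ws]
  | cons x t ih => simp only [ws, ih (k + 1), List.sum_cons]; ring

lemma ws_append_singleton (k : Int) (l : List Int) (x : Int) :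
    ws k (l ++ [x]) = ws k l + (k + l.length) * x := by
  induction l generalizing k with
  | nil => simp [ws]
  | cons y t ih => simp only [List.cons_append, ws, ih (k + 1), List.length_cons]; push_cast; ring

lemma enum_fold (l : List Int) (k s : Int) :
    (PySem.List.enumerate l k).foldl (fun s p => s + (p.1 + 1) * p.2) s = s + ws (k + 1) l := by
  induction l generalizing k s with
  | nil => simp [PySem.List.enumerate_nil, ws]
  | cons x t ih =>
    simp only [PySem.List.enumerate_cons, List.foldl_cons, ws, ih]; ring

-- the three state components of A after a right-rotation, re-expressed for the rotated list
lemma rot_sum (b : List Int) (x : Int) : (b ++ [x]).sum = (x :: b).sum := by simp; ring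

lemma rot_s1 (b : List Int) (x : Int) (n : Int) (hn : n = (b.length : Int) + 1) :
    ws 1 (b ++ [x]) - n * x + (b ++ [x]).sum = ws 1 (x :: b) := by
  subst hn
  rw [ws_append_singleton, show ws 1 (x :: b) = 1 * x + ws (1 + 1) b from rfl, ws_succ 1 b]
  simp only [List.sum_append, List.sum_cons, List.sum_nil]
  ring

lemma rot_s2 (b : List Int) (x : Int) (n : Int) (hn : n = (b.length : Int) + 1) :
    ws 1 (b ++ [x]).reverse - (b ++ [x]).sum + n * x = ws 1 (x :: b).reverse := by
  subst hn
  have e1 : (b ++ [x]).reverse = x :: b.reverse := by simp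
  have e2 : (x :: b).reverse = b.reverse ++ [x] := by simp
  rw [e1, e2, ws_append_singleton,
    show ws 1 (x :: b.reverse) = 1 * x + ws (1 + 1) b.reverse from rfl, ws_succ 1 b.reverse]
  simp only [List.sum_append, List.sum_cons, List.sum_nil, List.sum_reverse, List.length_reverse]
  ring

-- PreAux c qs: qs is runnable starting from a deque of length c (c counts type-3 queries seen)
def PreAux : Nat → List (List Int) → Prop
  | _, [] => True
  | c, q :: rest =>
      q ≠ [] ∧ (q.head? = some 3 → 2 ≤ q.length) ∧ (q.head? = some 1 → 0 < c) ∧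
      PreAux (c + (if q.head? = some 3 then 1 else 0)) rest

lemma pre_bridge (qs : List (List Int)) (c : Nat)
    (h : ∀ i, (h : i < qs.length) →
      qs[i] ≠ [] ∧ (qs[i].head? = some 3 → 2 ≤ qs[i].length) ∧
      (qs[i].head? = some 1 → c + (qs.take i).countP (fun q => q.head? == some 3) ≠ 0)) :
    PreAux c qs := by
  induction qs generalizing c with
  | nil => trivial
  | cons q rest ih =>
    obtain ⟨h1, h2, h3⟩ := h 0 (by simp)
    refine ⟨h1, h2, ?_, ?_⟩
    · intro ht; have := h3 ht; simp at this; omega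
    · apply ih
      intro i hi
      obtain ⟨g1, g2, g3⟩ := h (i + 1) (by simpa using hi)
      refine ⟨by simpa using g1, by simpa using g2, ?_⟩
      intro ht
      have := g3 (by simpa using ht)
      simp [List.countP_cons] at this ⊢
      by_cases h3q : q.head? = some 3
      · simp [h3q] at this ⊢
      · simp [h3q] at this ⊢; exact this

def finA (st : Option (List Int × List Int × Bool × Int × Int × Int)) : List Int :=
  match st with
  | none => []
  | some (res, _, _, _, _, _) => res

def finB (st : Option (List Int × List Int)) : List Int :=
  match st with
  | none => []
  | some (_, out) => out

lemma pyGet?_zero_cons' (x : Int) (xs : List Int) : PySem.List.pyGet? (x :: xs) 0 = some x := by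
  simp [pysem]

lemma insert_zero (xs : List Int) (x : Int) : PySem.List.insert xs 0 x = x :: xs := by
  simp [PySem.List.insert, PySem.List.sliceIndices]

lemma main_inv (qs : List (List Int)) :
    ∀ (c : Nat) (q out a : List Int) (rev : Bool),
      PreAux c qs → q.length = c → a = (if rev then q.reverse else q) →
      finA (qs.foldl checkStepA (some (out, q, rev, a.sum, ws 1 a, ws 1 a.reverse)))
        = finB (qs.foldl checkStepB (some (a, out))) := by
  induction qs with
  | nil => intro c q out a rev _ _ _; rfl
  | cons q0 rest ih =>
    intro c q out a rev hpre hlen ha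
    obtain ⟨hne, h3, h1, hrest⟩ := hpre
    obtain ⟨t, tl, rfl⟩ : ∃ t tl, q0 = t :: tl := by
      cases q0 with
      | nil => exact absurd rfl hne
      | cons t tl => exact ⟨t, tl, rfl⟩
    simp only [List.foldl_cons]
    by_cases ht1 : t = 1
    · -- type 1: right rotation
      subst ht1
      have hc : 0 < c := h1 (by simp)
      have hq : q ≠ [] := by intro h; rw [h] at hlen; simp at hlen; omega
      cases rev with
      | false =>
        simp only [if_neg (by simp : ¬(false = true))] at ha
        subst ha
        obtain ⟨b, x, rfl⟩ : ∃ b x, a = b ++ [x] := by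
          rcases List.eq_nil_or_concat a with h | ⟨b, x, h⟩
          · exact absurd h hq  -- hq is about the surviving variable after subst
          · exact ⟨b, x, by simpa [List.concat_eq_append] using h⟩
        have hn : ((b ++ [x]).length : Int) = (b.length : Int) + 1 := by simp
        simp only [checkStepA, checkStepB, pyGet?_zero_cons', Bool.false_eq_true, reduceIte,
          PySem.List.pyGet?_neg_one, List.getLast?_concat, PySem.List.pop?_last,
          insert_zero, List.dropLast_concat]
        rw [rot_s1 b x _ hn, rot_s2 b x _ hn, rot_sum b x, enum_fold]
        simp only [zero_add]
        exact ih c (x :: b) (out ++ [ws 1 (x :: b)]) (x :: b) false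
          (by simpa using hrest) (by simp at hlen ⊢; omega) (by simp)
      | true =>
        simp only [] at ha
        obtain ⟨x, b', rfl⟩ : ∃ x b', q = x :: b' := by
          cases q with
          | nil => exact absurd rfl hq
          | cons x b' => exact ⟨x, b', rfl⟩
        have haeq : a = b'.reverse ++ [x] := by simpa using ha
        subst haeq
        have hn : (((x :: b').length : Nat) : Int) = ((b'.reverse).length : Int) + 1 := by simp
        simp only [checkStepA, checkStepB, pyGet?_zero_cons', reduceIte, List.tail_cons,
          PySem.List.pop?_last, insert_zero]
        rw [rot_s1 b'.reverse x _ hn, rot_s2 b'.reverse x _ hn, rot_sum b'.reverse x, enum_fold]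
        simp only [zero_add]
        have hlen2 : ((x :: b').length : Nat) = c := by simpa using hlen
        exact ih c (b' ++ [x]) (out ++ [ws 1 (x :: b'.reverse)]) (x :: b'.reverse) true
          (by simpa using hrest) (by simp at hlen2 ⊢; omega) (by simp)
    · by_cases ht2 : t = 2
      · -- type 2: reverse
        subst ht2
        simp only [checkStepA, checkStepB, pyGet?_zero_cons']
        simp only [reduceIte, if_neg (by norm_num : ¬((2:Int) = 1))]
        rw [enum_fold]
        simp only [zero_add]
        have := ih c q (out ++ [ws 1 a.reverse]) a.reverse (!rev)
          (by simpa using hrest) hlen (by cases rev <;> simp_all)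
        rw [← this]
        simp
      · by_cases ht3 : t = 3
        · -- type 3: append
          subst ht3
          obtain ⟨v, tl', rfl⟩ : ∃ v tl', tl = v :: tl' := by
            have := h3 (by simp)
            cases tl with
            | nil => simp at this
            | cons v tl' => exact ⟨v, tl', rfl⟩
          have halen : (a.length : Int) = (q.length : Int) := by
            subst ha; cases rev <;> simp
          have g1 : PySem.List.pyGet? (3 :: v :: tl' : List Int) 1 = some v := by simp [pysem]
          simp only [checkStepA, checkStepB, pyGet?_zero_cons', g1,
            if_neg (by norm_num : ¬((3:Int) = 1)), if_neg (by norm_num : ¬((3:Int) = 2)),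
            reduceIte]
          have e1 : ws 1 a + ((q.length : Int) + 1) * v = ws 1 (a ++ [v]) := by
            rw [ws_append_singleton, ← halen]; ring
          have e2 : ws 1 a.reverse + a.sum + v = ws 1 (a ++ [v]).reverse := by
            have h' : (a ++ [v]).reverse = v :: a.reverse := by simp
            rw [h', show ws 1 (v :: a.reverse) = 1 * v + ws (1 + 1) a.reverse from rfl,
              ws_succ 1 a.reverse]
            simp only [List.sum_reverse]
            ring
          have e3 : a.sum + v = (a ++ [v]).sum := by simp
          rw [e1, e2, e3, enum_fold]
          simp only [zero_add]
          exact ih (c + 1) (if rev then v :: q else q ++ [v]) (out ++ [ws 1 (a ++ [v])])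
            (a ++ [v]) rev (by simpa using hrest)
            (by cases rev <;> simp [hlen])
            (by cases rev <;> simp_all)
        · -- other query type: no-op
          simp only [checkStepA, checkStepB, pyGet?_zero_cons',
            if_neg ht1, if_neg ht2, if_neg ht3,
            if_neg (by tauto : ¬(t = 1 ∨ t = 2 ∨ t = 3))]
          exact ih c q out a rev (by simpa [ht3] using hrest) hlen ha

-- ===== VERDICT (by name: the statement is the Claim_ definition above) =====
theorem check_spec : Claim_equal_check := by
  intro queries _ hpre
  unfold Spec_check check check_alt
  have hb : PreAux 0 queries := by
    apply pre_bridge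
    intro i h
    obtain ⟨a1, a2, a3⟩ := hpre i h
    exact ⟨a1, a2, fun ht => by simpa using a3 ht⟩
  have h := main_inv queries 0 [] [] [] false hb rfl (by simp)
  simpa [finA, finB, ws] using h
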